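-- pv_equiv track=rewrite | github.com/joba2008/budget_system | budget_system/_import csv to database.py | categorize_columns
-- ===== SOURCE A (Python) =====
-- def categorize_columns(headers: list[str]) -> dict[str, list[str]]:
--     """
--     将 CSV header 依前缀分配到各子表 group。
--     回传 dict，key 为 table name，value 为属于该表的 column 名称列表。
--     """
--     groups: dict[str, list[str]] = {
--         "bsa_volume_actual":       [],
--         "bsa_volume":              [],
--         "bsa_actual":              [],
--         "bsa_spending":            [],
--         "bsa_rebase_financeview":  [],
--         "bsa_rebase_opsview":      [],
--         "bsa_saving":              [],
--         "bsa_newadd":              [],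
--     }
--     for h in headers:
--         hl = h.lower()
--         if hl.startswith("volume_actual_"):
--             groups["bsa_volume_actual"].append(h)
--         elif hl.startswith("volume_"):
--             groups["bsa_volume"].append(h)
--         elif hl.startswith("actual_"):
--             groups["bsa_actual"].append(h)
--         elif hl.startswith("spending_"):
--             groups["bsa_spending"].append(h)
--         elif hl.startswith("rebase_financeview_"):
--             groups["bsa_rebase_financeview"].append(h)
--         elif hl.startswith("rebase_opsview_"):
--             groups["bsa_rebase_opsview"].append(h)
--         elif hl.startswith("saving_"):
--             groups["bsa_saving"].append(h)
--         elif hl.startswith("newadd_"):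
--             groups["bsa_newadd"].append(h)
--     return groups
-- ===== SOURCE B (Python) =====
-- # Association of prefixes to tables; NOT priority-ordered: the longest matching
-- # prefix wins, which resolves the only nested pair (volume_ vs volume_actual_).
-- PREFIX_TO_TABLE = {
--     "volume_": "bsa_volume",
--     "volume_actual_": "bsa_volume_actual",
--     "actual_": "bsa_actual",
--     "spending_": "bsa_spending",
--     "rebase_financeview_": "bsa_rebase_financeview",
--     "rebase_opsview_": "bsa_rebase_opsview",
--     "saving_": "bsa_saving",
--     "newadd_": "bsa_newadd",
-- }
--
-- TABLES = [
--     "bsa_volume_actual", "bsa_volume", "bsa_actual", "bsa_spending",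
--     "bsa_rebase_financeview", "bsa_rebase_opsview", "bsa_saving", "bsa_newadd",
-- ]
--
--
-- def _classify(header: str):
--     """Table for a header: the LONGEST matching prefix (None if no prefix matches)."""
--     hl = header.lower()
--     matches = [p for p in PREFIX_TO_TABLE if hl.startswith(p)]
--     if not matches:
--         return None
--     return PREFIX_TO_TABLE[max(matches, key=len)]
--
--
-- def categorize_columns(headers: list[str]) -> dict[str, list[str]]:
--     return {t: [h for h in headers if _classify(h) == t] for t in TABLES}
-- ===== Notes on version B (the rewrite author's own statement) =====
-- stated objective: alternative
-- what changed: Replaces A's single pass with an ordered elif chain mutating a dict by a longest-matching-prefix classifier over an unordered prefix map plus one grouping pass per table (dict comprehension of filters); trades the single pass for a pass per table.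
import Mathlib
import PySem

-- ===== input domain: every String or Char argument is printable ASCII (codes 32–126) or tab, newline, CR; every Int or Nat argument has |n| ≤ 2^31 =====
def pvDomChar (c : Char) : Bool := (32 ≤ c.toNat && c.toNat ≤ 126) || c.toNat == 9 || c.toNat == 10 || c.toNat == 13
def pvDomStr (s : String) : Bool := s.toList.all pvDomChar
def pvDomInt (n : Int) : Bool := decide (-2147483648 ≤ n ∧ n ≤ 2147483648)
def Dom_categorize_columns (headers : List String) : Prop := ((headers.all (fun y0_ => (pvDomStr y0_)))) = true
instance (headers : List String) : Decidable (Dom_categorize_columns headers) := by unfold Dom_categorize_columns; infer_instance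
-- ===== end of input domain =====

-- B replaces A's single pass with an ordered elif chain mutating a dict by a
-- longest-matching-prefix classifier over an unordered prefix map plus one
-- grouping pass per table (objective: alternative; trades one pass for a pass per table).

-- ===== PORT A =====
def categorize_columns (headers : List String) : List (String × List String) :=
  let groups : PySem.Dict String (List String) :=
    PySem.Dict.ofList [("bsa_volume_actual", []), ("bsa_volume", []), ("bsa_actual", []),
      ("bsa_spending", []), ("bsa_rebase_financeview", []), ("bsa_rebase_opsview", []),
      ("bsa_saving", []), ("bsa_newadd", [])]
  let groups := headers.foldl (fun g h =>
    let hl := PySem.Str.lower h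
    if PySem.Str.startswith hl "volume_actual_" then g.modify "bsa_volume_actual" [] (· ++ [h])
    else if PySem.Str.startswith hl "volume_" then g.modify "bsa_volume" [] (· ++ [h])
    else if PySem.Str.startswith hl "actual_" then g.modify "bsa_actual" [] (· ++ [h])
    else if PySem.Str.startswith hl "spending_" then g.modify "bsa_spending" [] (· ++ [h])
    else if PySem.Str.startswith hl "rebase_financeview_" then g.modify "bsa_rebase_financeview" [] (· ++ [h])
    else if PySem.Str.startswith hl "rebase_opsview_" then g.modify "bsa_rebase_opsview" [] (· ++ [h])
    else if PySem.Str.startswith hl "saving_" then g.modify "bsa_saving" [] (· ++ [h])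
    else if PySem.Str.startswith hl "newadd_" then g.modify "bsa_newadd" [] (· ++ [h])
    else g) groups
  groups.items

-- ===== PORT B =====
-- unordered prefix → table map (volume_ deliberately FIRST: order is irrelevant, the longest match wins)
def pvPrefixMap : List (String × String) :=
  [("volume_", "bsa_volume"), ("volume_actual_", "bsa_volume_actual"),
   ("actual_", "bsa_actual"), ("spending_", "bsa_spending"),
   ("rebase_financeview_", "bsa_rebase_financeview"),
   ("rebase_opsview_", "bsa_rebase_opsview"),
   ("saving_", "bsa_saving"), ("newadd_", "bsa_newadd")]

def pvTables : List String :=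
  ["bsa_volume_actual", "bsa_volume", "bsa_actual", "bsa_spending",
   "bsa_rebase_financeview", "bsa_rebase_opsview", "bsa_saving", "bsa_newadd"]

def pvClassify (header : String) : Option String :=
  let hl := PySem.Str.lower header
  let hits := (pvPrefixMap.map (·.1)).filter (fun p => PySem.Str.startswith hl p)
  match PySem.List.max? hits (fun p => PySem.Str.len p) with
  | none => none
  | some m => (PySem.Dict.ofList pvPrefixMap).get? m

def categorize_columns_alt (headers : List String) : List (String × List String) :=
  pvTables.map (fun t => (t, headers.filter (fun h => pvClassify h == some t)))

-- ===== PRECONDITION & SPEC =====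
def Spec_categorize_columns (headers : List String) (out : List (String × List String)) : Prop := out = categorize_columns_alt headers
instance (headers : List String) (out : List (String × List String)) : Decidable (Spec_categorize_columns headers out) := by unfold Spec_categorize_columns; infer_instance

-- ===== CLAIM (what is proved, stated in full; the proofs are below) =====
def Claim_equal_categorize_columns : Prop := ∀ (headers : List String), Dom_categorize_columns headers → Spec_categorize_columns headers (categorize_columns headers)

-- ===== LEMMAS AND PROOFS =====

-- A's elif chain as a classifier (proof-only helper)
def pvClassifyA (h : String) : Option String :=
  let hl := PySem.Str.lower h
  if PySem.Str.startswith hl "volume_actual_" then some "bsa_volume_actual"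
  else if PySem.Str.startswith hl "volume_" then some "bsa_volume"
  else if PySem.Str.startswith hl "actual_" then some "bsa_actual"
  else if PySem.Str.startswith hl "spending_" then some "bsa_spending"
  else if PySem.Str.startswith hl "rebase_financeview_" then some "bsa_rebase_financeview"
  else if PySem.Str.startswith hl "rebase_opsview_" then some "bsa_rebase_opsview"
  else if PySem.Str.startswith hl "saving_" then some "bsa_saving"
  else if PySem.Str.startswith hl "newadd_" then some "bsa_newadd"
  else none

-- two prefixes of the same string are nested; a decidable non-nesting refutes joint matching
theorem pv_sw_excl (s p q : String) (hp : PySem.Str.startswith s p = true)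
    (hside : ((decide (p.toList.length ≤ q.toList.length) && !(p.toList.isPrefixOf q.toList)) ||
              (decide (q.toList.length ≤ p.toList.length) && !(q.toList.isPrefixOf p.toList))) = true) :
    PySem.Str.startswith s q = false := by
  rw [PySem.Str.startswith_eq] at hp ⊢
  rw [PySem.Chars.startswith_iff] at hp
  by_contra hq
  rw [Bool.not_eq_false, PySem.Chars.startswith_iff] at hq
  simp only [Bool.or_eq_true, Bool.and_eq_true, decide_eq_true_eq, Bool.not_eq_true',
    List.isPrefixOf_iff_prefix, ← Bool.not_eq_true, decide_eq_true_eq] at hside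
  rcases hside with ⟨hlen, hnp⟩ | ⟨hlen, hnp⟩
  · exact absurd (List.prefix_of_prefix_length_le hp hq hlen) (by simpa using hnp)
  · exact absurd (List.prefix_of_prefix_length_le hq hp hlen) (by simpa using hnp)

theorem pv_sw_of (s p q : String) (hp : PySem.Str.startswith s p = true)
    (hq : q.toList.isPrefixOf p.toList = true) : PySem.Str.startswith s q = true := by
  rw [PySem.Str.startswith_eq, PySem.Chars.startswith_iff]
  rw [PySem.Str.startswith_eq, PySem.Chars.startswith_iff] at hp
  exact List.IsPrefix.trans (List.isPrefixOf_iff_prefix.mp hq) hp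

-- the two classifiers agree on every header
theorem pv_classify_eq (h : String) : pvClassifyA h = pvClassify h := by
  unfold pvClassifyA pvClassify
  set hl := PySem.Str.lower h with hhl
  by_cases h1 : PySem.Str.startswith hl "volume_actual_" = true
  · have hv : PySem.Str.startswith hl "volume_" = true := pv_sw_of _ _ _ h1 (by decide)
    have h3 : PySem.Str.startswith hl "actual_" = false := pv_sw_excl _ _ _ h1 (by decide)
    have h4 : PySem.Str.startswith hl "spending_" = false := pv_sw_excl _ _ _ h1 (by decide)
    have h5 : PySem.Str.startswith hl "rebase_financeview_" = false := pv_sw_excl _ _ _ h1 (by decide)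
    have h6 : PySem.Str.startswith hl "rebase_opsview_" = false := pv_sw_excl _ _ _ h1 (by decide)
    have h7 : PySem.Str.startswith hl "saving_" = false := pv_sw_excl _ _ _ h1 (by decide)
    have h8 : PySem.Str.startswith hl "newadd_" = false := pv_sw_excl _ _ _ h1 (by decide)
    simp only [pvPrefixMap, List.map, List.filter, h1, hv, h3, h4, h5, h6, h7, h8, if_true, Bool.false_eq_true, if_false]
    rfl
  · rw [Bool.not_eq_true] at h1
    by_cases h2 : PySem.Str.startswith hl "volume_" = true
    · have h3 : PySem.Str.startswith hl "actual_" = false := pv_sw_excl _ _ _ h2 (by decide)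
      have h4 : PySem.Str.startswith hl "spending_" = false := pv_sw_excl _ _ _ h2 (by decide)
      have h5 : PySem.Str.startswith hl "rebase_financeview_" = false := pv_sw_excl _ _ _ h2 (by decide)
      have h6 : PySem.Str.startswith hl "rebase_opsview_" = false := pv_sw_excl _ _ _ h2 (by decide)
      have h7 : PySem.Str.startswith hl "saving_" = false := pv_sw_excl _ _ _ h2 (by decide)
      have h8 : PySem.Str.startswith hl "newadd_" = false := pv_sw_excl _ _ _ h2 (by decide)
      simp only [pvPrefixMap, List.map, List.filter, h1, h2, h3, h4, h5, h6, h7, h8, if_true, Bool.false_eq_true, if_false]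
      rfl
    · rw [Bool.not_eq_true] at h2
      by_cases h3 : PySem.Str.startswith hl "actual_" = true
      · have h4 : PySem.Str.startswith hl "spending_" = false := pv_sw_excl _ _ _ h3 (by decide)
        have h5 : PySem.Str.startswith hl "rebase_financeview_" = false := pv_sw_excl _ _ _ h3 (by decide)
        have h6 : PySem.Str.startswith hl "rebase_opsview_" = false := pv_sw_excl _ _ _ h3 (by decide)
        have h7 : PySem.Str.startswith hl "saving_" = false := pv_sw_excl _ _ _ h3 (by decide)
        have h8 : PySem.Str.startswith hl "newadd_" = false := pv_sw_excl _ _ _ h3 (by decide)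
        simp only [pvPrefixMap, List.map, List.filter, h1, h2, h3, h4, h5, h6, h7, h8, if_true, Bool.false_eq_true, if_false]
        rfl
      · rw [Bool.not_eq_true] at h3
        by_cases h4 : PySem.Str.startswith hl "spending_" = true
        · have h5 : PySem.Str.startswith hl "rebase_financeview_" = false := pv_sw_excl _ _ _ h4 (by decide)
          have h6 : PySem.Str.startswith hl "rebase_opsview_" = false := pv_sw_excl _ _ _ h4 (by decide)
          have h7 : PySem.Str.startswith hl "saving_" = false := pv_sw_excl _ _ _ h4 (by decide)
          have h8 : PySem.Str.startswith hl "newadd_" = false := pv_sw_excl _ _ _ h4 (by decide)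
          simp only [pvPrefixMap, List.map, List.filter, h1, h2, h3, h4, h5, h6, h7, h8, if_true, Bool.false_eq_true, if_false]
          rfl
        · rw [Bool.not_eq_true] at h4
          by_cases h5 : PySem.Str.startswith hl "rebase_financeview_" = true
          · have h6 : PySem.Str.startswith hl "rebase_opsview_" = false := pv_sw_excl _ _ _ h5 (by decide)
            have h7 : PySem.Str.startswith hl "saving_" = false := pv_sw_excl _ _ _ h5 (by decide)
            have h8 : PySem.Str.startswith hl "newadd_" = false := pv_sw_excl _ _ _ h5 (by decide)
            simp only [pvPrefixMap, List.map, List.filter, h1, h2, h3, h4, h5, h6, h7, h8, if_true, Bool.false_eq_true, if_false]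
            rfl
          · rw [Bool.not_eq_true] at h5
            by_cases h6 : PySem.Str.startswith hl "rebase_opsview_" = true
            · have h7 : PySem.Str.startswith hl "saving_" = false := pv_sw_excl _ _ _ h6 (by decide)
              have h8 : PySem.Str.startswith hl "newadd_" = false := pv_sw_excl _ _ _ h6 (by decide)
              simp only [pvPrefixMap, List.map, List.filter, h1, h2, h3, h4, h5, h6, h7, h8, if_true, Bool.false_eq_true, if_false]
              rfl
            · rw [Bool.not_eq_true] at h6
              by_cases h7 : PySem.Str.startswith hl "saving_" = true
              · have h8 : PySem.Str.startswith hl "newadd_" = false := pv_sw_excl _ _ _ h7 (by decide)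
                simp only [pvPrefixMap, List.map, List.filter, h1, h2, h3, h4, h5, h6, h7, h8, if_true, Bool.false_eq_true, if_false]
                rfl
              · rw [Bool.not_eq_true] at h7
                by_cases h8 : PySem.Str.startswith hl "newadd_" = true
                · simp only [pvPrefixMap, List.map, List.filter, h1, h2, h3, h4, h5, h6, h7, h8, if_true, Bool.false_eq_true, if_false]
                  rfl
                · rw [Bool.not_eq_true] at h8
                  simp only [pvPrefixMap, List.map, List.filter, h1, h2, h3, h4, h5, h6, h7, h8, Bool.false_eq_true, if_false]
                  rfl

-- A's fold step, expressed through pvClassifyA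
theorem pv_step_eq (g : PySem.Dict String (List String)) (h : String) :
    (let hl := PySem.Str.lower h
     if PySem.Str.startswith hl "volume_actual_" then g.modify "bsa_volume_actual" [] (· ++ [h])
     else if PySem.Str.startswith hl "volume_" then g.modify "bsa_volume" [] (· ++ [h])
     else if PySem.Str.startswith hl "actual_" then g.modify "bsa_actual" [] (· ++ [h])
     else if PySem.Str.startswith hl "spending_" then g.modify "bsa_spending" [] (· ++ [h])
     else if PySem.Str.startswith hl "rebase_financeview_" then g.modify "bsa_rebase_financeview" [] (· ++ [h])
     else if PySem.Str.startswith hl "rebase_opsview_" then g.modify "bsa_rebase_opsview" [] (· ++ [h])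
     else if PySem.Str.startswith hl "saving_" then g.modify "bsa_saving" [] (· ++ [h])
     else if PySem.Str.startswith hl "newadd_" then g.modify "bsa_newadd" [] (· ++ [h])
     else g) =
    (match pvClassifyA h with
     | some t => g.modify t [] (· ++ [h])
     | none => g) := by
  unfold pvClassifyA
  dsimp only
  split_ifs <;> rfl

-- pointwise-equal step functions fold alike
theorem pv_foldl_congr {A B : Type} (f f' : B -> A -> B) (hff : forall b a, f b a = f' b a)
    (i : B) (l : List A) : l.foldl f i = l.foldl f' i := by
  have hf : f = f' := funext fun b => funext fun a => hff b a
  rw [hf]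

-- the match-form fold over headers equals the modify-fold over the classified pairs
theorem pv_fold_pairs (headers : List String) (d : PySem.Dict String (List String)) :
    headers.foldl (fun g h =>
      match pvClassifyA h with
      | some t => g.modify t [] (· ++ [h])
      | none => g) d =
    (headers.filterMap (fun h => (pvClassifyA h).map (fun t => (t, h)))).foldl
      (fun g p => g.modify p.1 [] (· ++ [p.2])) d := by
  induction headers generalizing d with
  | nil => rfl
  | cons h t ih =>
    rw [List.foldl_cons, List.filterMap_cons]
    cases hc : pvClassifyA h with
    | none => exact ih _
    | some u => exact ih _

-- the classified pairs, filtered at a table, are B's filter of the headers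
theorem pv_filter_pairs (headers : List String) (t : String) :
    ((headers.filterMap (fun h => (pvClassifyA h).map (fun u => (u, h)))).filter
      (fun p => p.1 == t)).map (·.2) =
    headers.filter (fun h => pvClassify h == some t) := by
  induction headers with
  | nil => rfl
  | cons h tl ih =>
    rw [List.filterMap_cons, List.filter_cons]
    cases hc : pvClassifyA h with
    | none =>
      have hb : (pvClassify h == some t) = false := by
        rw [← pv_classify_eq, hc]
        rfl
      rw [hb]
      simpa using ih
    | some u =>
      have hb : (pvClassify h == some t) = (u == t) := by
        rw [← pv_classify_eq, hc]
        simp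
      rw [hb, Option.map_some]
      by_cases hut : u = t
      · subst hut
        simp only [beq_self_eq_true, if_true, List.filter_cons, List.map_cons]
        rw [ih]
      · simp only [beq_false_of_ne hut, Bool.false_eq_true, if_false, List.filter_cons]
        exact ih

-- every classified key is one of the eight table names
theorem pv_classifyA_mem (h : String) (t : String) (ht : pvClassifyA h = some t) :
    t ∈ pvTables := by
  unfold pvClassifyA at ht
  simp only at ht
  split_ifs at ht <;> simp_all [pvTables]

-- Set.update by elements already present is the identity
theorem pv_set_update_self (s l : List String) (hsub : ∀ x ∈ l, x ∈ s) :
    PySem.Set.update s l = s := by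
  rw [PySem.Set.update_eq_append_filter]
  have hnil : (PySem.Set.ofList l).filter (fun y => !(PySem.Set.contains s y)) = [] := by
    apply List.filter_eq_nil_iff.mpr
    intro y hy
    have hys := hsub y ((PySem.Set.mem_ofList l y).mp hy)
    simp [hys]
  rw [hnil, List.append_nil]

-- the pair-fold over the eight-key dict, read back as items
theorem pv_items_eq (headers : List String) :
    (((headers.filterMap (fun h => (pvClassifyA h).map (fun t => (t, h)))).foldl
        (fun g p => g.modify p.1 [] (· ++ [p.2]))
        (PySem.Dict.ofList [("bsa_volume_actual", []), ("bsa_volume", []), ("bsa_actual", []),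
          ("bsa_spending", []), ("bsa_rebase_financeview", []), ("bsa_rebase_opsview", []),
          ("bsa_saving", []), ("bsa_newadd", [])])).items) =
    categorize_columns_alt headers := by
  set init : PySem.Dict String (List String) :=
    PySem.Dict.ofList [("bsa_volume_actual", []), ("bsa_volume", []), ("bsa_actual", []),
      ("bsa_spending", []), ("bsa_rebase_financeview", []), ("bsa_rebase_opsview", []),
      ("bsa_saving", []), ("bsa_newadd", [])] with hinit
  set pairs := headers.filterMap (fun h => (pvClassifyA h).map (fun t => (t, h))) with hpairs
  have hkeys : (pairs.foldl (fun g p => g.modify p.1 [] (· ++ [p.2])) init).keys = pvTables := by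
    have hk := PySem.Dict.keys_foldl_modify_key pairs (fun p => p.1) []
      (fun _ p => (· ++ [p.2])) init
    rw [hk]
    have hik : init.keys = pvTables := by rw [hinit]; decide
    rw [hik]
    apply pv_set_update_self
    intro x hx
    simp only [List.mem_map] at hx
    obtain ⟨p, hp, hpx⟩ := hx
    rw [hpairs] at hp
    simp only [List.mem_filterMap, Option.map_eq_some_iff] at hp
    obtain ⟨h, _, u, hu, hph⟩ := hp
    subst hpx
    rw [← hph]
    exact pv_classifyA_mem h u hu
  have hnd : (pairs.foldl (fun g p => g.modify p.1 [] (· ++ [p.2])) init).keys.Nodup := by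
    rw [hkeys]; decide
  rw [PySem.Dict.items_eq_map_keys _ hnd []]
  rw [hkeys]
  unfold categorize_columns_alt
  apply List.map_congr_left
  intro t ht
  have hgd : init.getD t [] = [] := by
    rw [hinit]
    revert ht
    simp only [pvTables, List.mem_cons]
    rintro (rfl | rfl | rfl | rfl | rfl | rfl | rfl | rfl | h) <;> first | decide | cases h
  rw [PySem.Dict.getD_foldl_modify_append, hgd, List.nil_append, hpairs, pv_filter_pairs]

-- ===== VERDICT (by name: the statement is the Claim_ definition above) =====
theorem categorize_columns_spec : Claim_equal_categorize_columns := by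
  intro headers _
  unfold Spec_categorize_columns categorize_columns
  exact (congrArg PySem.Dict.items
    ((pv_foldl_congr _ _ pv_step_eq _ headers).trans (pv_fold_pairs headers _))).trans
    (pv_items_eq headers)
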